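-- pv_equiv track=rewrite | github.com/MrHamdulay/csc3-capstone | examples/data/Assignment_4/jblmuz001/boxes.py | get_rectangle
-- ===== SOURCE A (Python) =====
-- def get_rectangle (width, height):
--     s = ''
--     for i in range(1,height+1):
--
--             if i==1 or i==height:
--                 s = s +'*'*width +'\n'
--             else:
--                 s = s +'*' + (width -2)*' ' +'*'+'\n'
--     return s
-- ===== SOURCE B (Python) =====
-- def get_rectangle(width, height):
--     if height <= 0:
--         return ''
--     border = '*' * width + '\n'
--     if height == 1:
--         return border
--     inner = '*' + ' ' * (width - 2) + '*\n'
--     return border + inner * (height - 2) + border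
-- ===== Notes on version B (the rewrite author's own statement) =====
-- stated objective: simpler
-- what changed: Replaces the per-row loop with its i==1/i==height branch by a closed-form assembly: build the border and inner line once and return border + inner*(height-2) + border via string multiplication.
import Mathlib
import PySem

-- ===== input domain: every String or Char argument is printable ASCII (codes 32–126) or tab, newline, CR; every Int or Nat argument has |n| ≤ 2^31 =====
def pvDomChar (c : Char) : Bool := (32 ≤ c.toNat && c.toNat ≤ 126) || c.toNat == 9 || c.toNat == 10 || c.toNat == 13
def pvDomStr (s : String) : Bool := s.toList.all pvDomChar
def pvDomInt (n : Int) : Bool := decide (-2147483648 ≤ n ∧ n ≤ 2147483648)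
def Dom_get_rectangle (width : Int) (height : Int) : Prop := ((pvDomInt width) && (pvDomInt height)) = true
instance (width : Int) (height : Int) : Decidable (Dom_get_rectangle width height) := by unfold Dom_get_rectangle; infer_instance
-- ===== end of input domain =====

-- B replaces A's per-row loop and i==1/i==height branch by a closed-form string assembly
-- (border + inner*(height-2) + border); objective: simpler, same cost.


-- ===== PORT A =====
-- strings are ported as List Char (PySem.Chars style), wrapped in String.mk at the end
def get_rectangle (width : Int) (height : Int) : String :=
  String.mk ((PySem.List.pyRange 1 (height + 1) 1).foldl
    (fun s i =>
      if i = 1 ∨ i = height then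
        s ++ PySem.List.pyRepeat ['*'] width ++ ['\n']
      else
        s ++ ['*'] ++ PySem.List.pyRepeat [' '] (width - 2) ++ ['*'] ++ ['\n'])
    [])

-- ===== PORT B =====
def get_rectangle_alt (width : Int) (height : Int) : String :=
  if height ≤ 0 then "" else
  let border := PySem.List.pyRepeat ['*'] width ++ ['\n']
  if height = 1 then String.mk border else
  let inner := ['*'] ++ PySem.List.pyRepeat [' '] (width - 2) ++ ['*', '\n']
  String.mk (border ++ PySem.List.pyRepeat inner (height - 2) ++ border)

-- ===== PRECONDITION & SPEC =====
def Spec_get_rectangle (width : Int) (height : Int) (out : String) : Prop := out = get_rectangle_alt width height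
instance (width : Int) (height : Int) (out : String) : Decidable (Spec_get_rectangle width height out) := by unfold Spec_get_rectangle; infer_instance

-- ===== CLAIM (what is proved, stated in full; the proofs are below) =====
def Claim_equal_get_rectangle : Prop := ∀ (width : Int) (height : Int), Dom_get_rectangle width height → Spec_get_rectangle width height (get_rectangle width height)

-- ===== LEMMAS AND PROOFS =====

-- a flatMap whose function is constant on the list is a flattened replicate
theorem pv_flatMap_const {α β : Type} (l : List α) (c : List β) (g : α → List β)
    (h : ∀ x ∈ l, g x = c) : l.flatMap g = (List.replicate l.length c).flatten := by
  induction l with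
  | nil => simp
  | cons a t ih => simp_all [List.replicate_succ]

theorem get_rectangle_spec : Claim_equal_get_rectangle := by
  unfold Claim_equal_get_rectangle Spec_get_rectangle
  intro width height _
  unfold get_rectangle get_rectangle_alt
  set border : List Char := PySem.List.pyRepeat ['*'] width ++ ['\n'] with hb
  set inner : List Char := ['*'] ++ PySem.List.pyRepeat [' '] (width - 2) ++ ['*', '\n'] with hi
  have hbody : (fun (s : List Char) (i : Int) =>
      if i = 1 ∨ i = height then s ++ PySem.List.pyRepeat ['*'] width ++ ['\n']
      else s ++ ['*'] ++ PySem.List.pyRepeat [' '] (width - 2) ++ ['*'] ++ ['\n'])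
      = (fun s i => s ++ (if i = 1 ∨ i = height then border else inner)) := by
    funext s i; split_ifs <;> simp [hb, hi]
  rw [hbody, PySem.List.foldl_append_eq_flatMap, List.nil_append]
  by_cases h0 : height ≤ 0
  · rw [PySem.List.pyRange_one_eq_nil (by omega)]
    simp [h0]
    rfl
  · by_cases h1 : height = 1
    · subst h1
      have hfirst : PySem.List.pyRange 1 (1 + 1) 1 = [1] := by decide
      rw [hfirst]
      simp
    · -- 2 ≤ height
      have h2 : (2 : Int) ≤ height := by omega
      rw [PySem.List.pyRange_one_append 1 2 (height + 1) (by omega) (by omega),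
          PySem.List.pyRange_one_append 2 height (height + 1) (by omega) (by omega)]
      have hfirst : PySem.List.pyRange 1 2 1 = [1] := by decide
      have hlast : PySem.List.pyRange height (height + 1) 1 = [height] :=
        PySem.List.pyRange_one_singleton height
      rw [hfirst, hlast]
      have hmid : (PySem.List.pyRange 2 height 1).flatMap
          (fun i => if i = 1 ∨ i = height then border else inner)
          = (List.replicate (PySem.List.pyRange 2 height 1).length inner).flatten := by
        apply pv_flatMap_const
        intro x hx
        rw [PySem.List.mem_pyRange_one] at hx
        have : ¬ (x = 1 ∨ x = height) := by omega
        simp [this]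
      simp only [List.flatMap_append, hmid, List.flatMap_singleton]
      have hiflen : (PySem.List.pyRange 2 height 1).length = (height - 2).toNat :=
        PySem.List.length_pyRange_one 2 height
      rw [hiflen]
      simp [h0, h1, PySem.List.pyRepeat]

-- ===== VERDICT (by name: the statement is the Claim_ definition above) =====
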